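-- pv_equiv track=rewrite | github.com/Dadudekc/AutoDream.Os | tools/devlog_consolidator.py | categorize_logs
-- ===== SOURCE A (Python) =====
-- def categorize_logs(logs: list[dict]) -> dict[str, list[dict]]:
--     """Categorize logs by type for consolidation."""
--     categories = {
--         "coordination": [],
--         "technical_fixes": [],
--         "achievements": [],
--         "planning": [],
--         "status_updates": [],
--         "other": [],
--     }
--
--     for log in logs:
--         content = log["content"].lower()
--
--         if any(
--             keyword in content
--             for keyword in ["coordination", "captain", "protocol", "communication"]
--         ):
--             categories["coordination"].append(log)
--         elif any(
--             keyword in content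
--             for keyword in ["fixed", "resolved", "implemented", "created", "updated"]
--         ):
--             categories["technical_fixes"].append(log)
--         elif any(
--             keyword in content
--             for keyword in ["complete", "success", "achievement", "milestone"]
--         ):
--             categories["achievements"].append(log)
--         elif any(keyword in content for keyword in ["plan", "strategy", "approach", "phase"]):
--             categories["planning"].append(log)
--         elif any(keyword in content for keyword in ["status", "progress", "update"]):
--             categories["status_updates"].append(log)
--         else:
--             categories["other"].append(log)
--
--     return categories
-- ===== SOURCE B (Python) =====
-- _RULES = [
--     ("coordination", ("coordination", "captain", "protocol", "communication")),
--     ("technical_fixes", ("fixed", "resolved", "implemented", "created", "updated")),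
--     ("achievements", ("complete", "success", "achievement", "milestone")),
--     ("planning", ("plan", "strategy", "approach", "phase")),
--     ("status_updates", ("status", "progress", "update")),
-- ]
--
--
-- def _label(content):
--     for cat, kws in _RULES:
--         if any(k in content for k in kws):
--             return cat
--     return "other"
--
--
-- def categorize_logs(logs: list[dict]) -> dict[str, list[dict]]:
--     """Categorize logs: one labelling pass, then group by category."""
--     labeled = [(_label(log["content"].lower()), log) for log in logs]
--     cats = [c for c, _ in _RULES] + ["other"]
--     return {c: [log for lbl, log in labeled if lbl == c] for c in cats}
-- ===== Notes on version B (the rewrite author's own statement) =====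
-- stated objective: alternative
-- what changed: Replaces the single fold with a six-way elif chain appending into mutable buckets by a data-driven rules table: one pass labels every log with its first matching category, then each bucket is produced by grouping the labeled list per category.
import Mathlib
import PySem

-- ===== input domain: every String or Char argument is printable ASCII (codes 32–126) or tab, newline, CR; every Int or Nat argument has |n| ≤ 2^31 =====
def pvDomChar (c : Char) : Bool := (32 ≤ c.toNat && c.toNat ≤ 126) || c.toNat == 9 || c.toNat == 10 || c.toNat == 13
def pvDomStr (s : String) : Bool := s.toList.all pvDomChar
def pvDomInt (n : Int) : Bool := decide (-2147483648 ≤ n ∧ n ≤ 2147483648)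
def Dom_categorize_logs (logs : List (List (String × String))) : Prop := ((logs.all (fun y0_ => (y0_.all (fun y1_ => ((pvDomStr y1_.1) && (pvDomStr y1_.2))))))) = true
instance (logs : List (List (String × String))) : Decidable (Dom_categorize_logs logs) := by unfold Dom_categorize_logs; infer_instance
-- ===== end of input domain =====

-- B replaces A's elif chain over mutable buckets by a rules table: a labelling pass then per-category grouping (alternative decomposition, same cost); equivalence of the RETURN value.

-- ===== PORT A =====
-- literal port of A: a dict of six empty buckets, one fold over logs, an elif chain appending into the matching bucket
def categorize_logs (logs : List (List (String × String))) : List (String × List (List (String × String))) :=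
  let categories : PySem.Dict String (List (List (String × String))) :=
    PySem.Dict.mk [("coordination", []), ("technical_fixes", []), ("achievements", []),
                   ("planning", []), ("status_updates", []), ("other", [])]
  (logs.foldl (fun categories log =>
    let content := PySem.Str.lower ((PySem.Dict.mk log).getD "content" "")
    if (["coordination", "captain", "protocol", "communication"].any (fun k => PySem.Str.isIn k content)) then
      categories.modify "coordination" [] (· ++ [log])
    else if (["fixed", "resolved", "implemented", "created", "updated"].any (fun k => PySem.Str.isIn k content)) then
      categories.modify "technical_fixes" [] (· ++ [log])
    else if (["complete", "success", "achievement", "milestone"].any (fun k => PySem.Str.isIn k content)) then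
      categories.modify "achievements" [] (· ++ [log])
    else if (["plan", "strategy", "approach", "phase"].any (fun k => PySem.Str.isIn k content)) then
      categories.modify "planning" [] (· ++ [log])
    else if (["status", "progress", "update"].any (fun k => PySem.Str.isIn k content)) then
      categories.modify "status_updates" [] (· ++ [log])
    else
      categories.modify "other" [] (· ++ [log])) categories).items

-- ===== PORT B =====
def pvRules : List (String × List String) :=
  [("coordination", ["coordination", "captain", "protocol", "communication"]),
   ("technical_fixes", ["fixed", "resolved", "implemented", "created", "updated"]),
   ("achievements", ["complete", "success", "achievement", "milestone"]),
   ("planning", ["plan", "strategy", "approach", "phase"]),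
   ("status_updates", ["status", "progress", "update"])]

def pvLabel : List (String × List String) → String → String
  | [], _ => "other"
  | (cat, kws) :: rest, content =>
      if kws.any (fun k => PySem.Str.isIn k content) then cat else pvLabel rest content

def categorize_logs_alt (logs : List (List (String × String))) : List (String × List (List (String × String))) :=
  let labeled := logs.map (fun log =>
    (pvLabel pvRules (PySem.Str.lower ((PySem.Dict.mk log).getD "content" "")), log))
  let cats := pvRules.map (·.1) ++ ["other"]
  cats.map (fun c => (c, (labeled.filter (fun p => p.1 == c)).map (·.2)))

-- ===== PRECONDITION & SPEC =====
-- Pre_ excludes logs lacking a "content" key, on which Python A raises KeyError.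
def Pre_categorize_logs (logs : List (List (String × String))) : Prop :=
  (logs.all (fun log => (PySem.Dict.mk log).contains "content")) = true
instance (logs : List (List (String × String))) : Decidable (Pre_categorize_logs logs) := by unfold Pre_categorize_logs; infer_instance
def pvWitness_categorize_logs : (List (List (String × String))) := [[("content", "Fixed the bug")], [("content", "weekly status")]]

def Spec_categorize_logs (logs : List (List (String × String))) (out : List (String × List (List (String × String)))) : Prop := out = categorize_logs_alt logs
instance (logs : List (List (String × String))) (out : List (String × List (List (String × String)))) : Decidable (Spec_categorize_logs logs out) := by unfold Spec_categorize_logs; infer_instance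

-- ===== CLAIM (what is proved, stated in full; the proofs are below) =====
def Claim_equal_categorize_logs : Prop := ∀ (logs : List (List (String × String))), Dom_categorize_logs logs → Pre_categorize_logs logs → Spec_categorize_logs logs (categorize_logs logs)

-- ===== LEMMAS AND PROOFS =====

-- label of one log, as B computes it
def pvLbl (log : List (String × String)) : String :=
  pvLabel pvRules (PySem.Str.lower ((PySem.Dict.mk log).getD "content" ""))

theorem pvMod1 (a b c d e o : List (List (String × String))) (x : List (String × String)) :
    (PySem.Dict.mk [("coordination", a), ("technical_fixes", b), ("achievements", c), ("planning", d), ("status_updates", e), ("other", o)]).modify "coordination" [] (· ++ [x]) = PySem.Dict.mk [("coordination", a ++ [x]), ("technical_fixes", b), ("achievements", c), ("planning", d), ("status_updates", e), ("other", o)] := rfl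
theorem pvMod2 (a b c d e o : List (List (String × String))) (x : List (String × String)) :
    (PySem.Dict.mk [("coordination", a), ("technical_fixes", b), ("achievements", c), ("planning", d), ("status_updates", e), ("other", o)]).modify "technical_fixes" [] (· ++ [x]) = PySem.Dict.mk [("coordination", a), ("technical_fixes", b ++ [x]), ("achievements", c), ("planning", d), ("status_updates", e), ("other", o)] := rfl
theorem pvMod3 (a b c d e o : List (List (String × String))) (x : List (String × String)) :
    (PySem.Dict.mk [("coordination", a), ("technical_fixes", b), ("achievements", c), ("planning", d), ("status_updates", e), ("other", o)]).modify "achievements" [] (· ++ [x]) = PySem.Dict.mk [("coordination", a), ("technical_fixes", b), ("achievements", c ++ [x]), ("planning", d), ("status_updates", e), ("other", o)] := rfl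
theorem pvMod4 (a b c d e o : List (List (String × String))) (x : List (String × String)) :
    (PySem.Dict.mk [("coordination", a), ("technical_fixes", b), ("achievements", c), ("planning", d), ("status_updates", e), ("other", o)]).modify "planning" [] (· ++ [x]) = PySem.Dict.mk [("coordination", a), ("technical_fixes", b), ("achievements", c), ("planning", d ++ [x]), ("status_updates", e), ("other", o)] := rfl
theorem pvMod5 (a b c d e o : List (List (String × String))) (x : List (String × String)) :
    (PySem.Dict.mk [("coordination", a), ("technical_fixes", b), ("achievements", c), ("planning", d), ("status_updates", e), ("other", o)]).modify "status_updates" [] (· ++ [x]) = PySem.Dict.mk [("coordination", a), ("technical_fixes", b), ("achievements", c), ("planning", d), ("status_updates", e ++ [x]), ("other", o)] := rfl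
theorem pvMod6 (a b c d e o : List (List (String × String))) (x : List (String × String)) :
    (PySem.Dict.mk [("coordination", a), ("technical_fixes", b), ("achievements", c), ("planning", d), ("status_updates", e), ("other", o)]).modify "other" [] (· ++ [x]) = PySem.Dict.mk [("coordination", a), ("technical_fixes", b), ("achievements", c), ("planning", d), ("status_updates", e), ("other", o ++ [x])] := rfl

theorem foldA_eq (logs : List (List (String × String)))
    (a b c d e o : List (List (String × String))) :
    (logs.foldl (fun categories log =>
      let content := PySem.Str.lower ((PySem.Dict.mk log).getD "content" "")
      if (["coordination", "captain", "protocol", "communication"].any (fun k => PySem.Str.isIn k content)) then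
        categories.modify "coordination" [] (· ++ [log])
      else if (["fixed", "resolved", "implemented", "created", "updated"].any (fun k => PySem.Str.isIn k content)) then
        categories.modify "technical_fixes" [] (· ++ [log])
      else if (["complete", "success", "achievement", "milestone"].any (fun k => PySem.Str.isIn k content)) then
        categories.modify "achievements" [] (· ++ [log])
      else if (["plan", "strategy", "approach", "phase"].any (fun k => PySem.Str.isIn k content)) then
        categories.modify "planning" [] (· ++ [log])
      else if (["status", "progress", "update"].any (fun k => PySem.Str.isIn k content)) then
        categories.modify "status_updates" [] (· ++ [log])
      else
        categories.modify "other" [] (· ++ [log]))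
      (PySem.Dict.mk [("coordination", a), ("technical_fixes", b), ("achievements", c), ("planning", d), ("status_updates", e), ("other", o)])).items
    = [("coordination", a ++ logs.filter (fun l => pvLbl l == "coordination")),
       ("technical_fixes", b ++ logs.filter (fun l => pvLbl l == "technical_fixes")),
       ("achievements", c ++ logs.filter (fun l => pvLbl l == "achievements")),
       ("planning", d ++ logs.filter (fun l => pvLbl l == "planning")),
       ("status_updates", e ++ logs.filter (fun l => pvLbl l == "status_updates")),
       ("other", o ++ logs.filter (fun l => pvLbl l == "other"))] := by
  induction logs generalizing a b c d e o with
  | nil => simp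
  | cons l ls ih =>
    by_cases h1 : (["coordination", "captain", "protocol", "communication"].any (fun k => PySem.Str.isIn k (PySem.Str.lower ((PySem.Dict.mk l).getD "content" "")))) = true
    · simp only [List.foldl_cons, h1, if_true, ite_true, ite_false, Bool.false_eq_true, if_false,
        pvMod1, pvMod2, pvMod3, pvMod4, pvMod5, pvMod6, ih]
      have hlb : pvLbl l = "coordination" := by
        simp only [pvLbl, pvRules, pvLabel, h1, if_true, ite_true, ite_false, Bool.false_eq_true, if_false]
      simp [List.filter_cons, hlb]
    by_cases h2 : (["fixed", "resolved", "implemented", "created", "updated"].any (fun k => PySem.Str.isIn k (PySem.Str.lower ((PySem.Dict.mk l).getD "content" "")))) = true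
    · simp only [List.foldl_cons, h1, h2, if_true, ite_true, ite_false, Bool.false_eq_true, if_false,
        pvMod1, pvMod2, pvMod3, pvMod4, pvMod5, pvMod6, ih]
      have hlb : pvLbl l = "technical_fixes" := by
        simp only [pvLbl, pvRules, pvLabel, h1, h2, if_true, ite_true, ite_false, Bool.false_eq_true, if_false]
      simp [List.filter_cons, hlb]
    by_cases h3 : (["complete", "success", "achievement", "milestone"].any (fun k => PySem.Str.isIn k (PySem.Str.lower ((PySem.Dict.mk l).getD "content" "")))) = true
    · simp only [List.foldl_cons, h1, h2, h3, if_true, ite_true, ite_false, Bool.false_eq_true, if_false,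
        pvMod1, pvMod2, pvMod3, pvMod4, pvMod5, pvMod6, ih]
      have hlb : pvLbl l = "achievements" := by
        simp only [pvLbl, pvRules, pvLabel, h1, h2, h3, if_true, ite_true, ite_false, Bool.false_eq_true, if_false]
      simp [List.filter_cons, hlb]
    by_cases h4 : (["plan", "strategy", "approach", "phase"].any (fun k => PySem.Str.isIn k (PySem.Str.lower ((PySem.Dict.mk l).getD "content" "")))) = true
    · simp only [List.foldl_cons, h1, h2, h3, h4, if_true, ite_true, ite_false, Bool.false_eq_true, if_false,
        pvMod1, pvMod2, pvMod3, pvMod4, pvMod5, pvMod6, ih]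
      have hlb : pvLbl l = "planning" := by
        simp only [pvLbl, pvRules, pvLabel, h1, h2, h3, h4, if_true, ite_true, ite_false, Bool.false_eq_true, if_false]
      simp [List.filter_cons, hlb]
    by_cases h5 : (["status", "progress", "update"].any (fun k => PySem.Str.isIn k (PySem.Str.lower ((PySem.Dict.mk l).getD "content" "")))) = true
    · simp only [List.foldl_cons, h1, h2, h3, h4, h5, if_true, ite_true, ite_false, Bool.false_eq_true, if_false,
        pvMod1, pvMod2, pvMod3, pvMod4, pvMod5, pvMod6, ih]
      have hlb : pvLbl l = "status_updates" := by
        simp only [pvLbl, pvRules, pvLabel, h1, h2, h3, h4, h5, if_true, ite_true, ite_false, Bool.false_eq_true, if_false]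
      simp [List.filter_cons, hlb]
    simp only [List.foldl_cons, h1, h2, h3, h4, h5, if_true, ite_true, ite_false, Bool.false_eq_true, if_false,
      pvMod1, pvMod2, pvMod3, pvMod4, pvMod5, pvMod6, ih]
    have hlb : pvLbl l = "other" := by
      simp only [pvLbl, pvRules, pvLabel, h1, h2, h3, h4, h5, if_true, ite_true, ite_false, Bool.false_eq_true, if_false]
    simp [List.filter_cons, hlb]

-- ===== VERDICT (by name: the statement is the Claim_ definition above) =====
theorem categorize_logs_spec : Claim_equal_categorize_logs := by
  intro logs _ _
  unfold Spec_categorize_logs categorize_logs categorize_logs_alt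
  simp only [foldA_eq]
  simp [List.filter_map, List.map_map, Function.comp_def, pvLbl, pvRules]
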